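-- pv_equiv track=rewrite | github.com/lcds90/python-studies | codewars/4kyu/test_format_duration.py | calculate_values_from_seconds
-- ===== SOURCE A (Python) =====
-- def calculate_values_from_seconds(sec: int) -> list:
--     years = sec // 31536000
--     days = sec // 86400 % 365
--     hours = sec // 3600 % 24
--     minutes = sec // 60 % 60
--     seconds = sec % 60
--
--     def str_format(value: int, name: str) -> str:
--         if value == 1:
--             return f"{value} {name}"
--         else:
--             return f"{value} {name}s"
--
--     values = [
--         [str_format(years, 'year'), years],
--         [str_format(days, 'day'), days],
--         [str_format(hours, 'hour'), hours],
--         [str_format(minutes, 'minute'), minutes],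
--         [str_format(seconds, 'second'), seconds]
--     ]
--
--     result = [
--         i[0] for i in values if i[1] > 0
--     ]
--
--     return result
-- ===== SOURCE B (Python) =====
-- def calculate_values_from_seconds(sec: int) -> list:
--     result = []
--     remaining = sec
--     for unit, name in ((31536000, 'year'), (86400, 'day'), (3600, 'hour'),
--                        (60, 'minute'), (1, 'second')):
--         count, remaining = divmod(remaining, unit)
--         if count > 0:
--             result.append(f"{count} {name}" if count == 1 else f"{count} {name}s")
--     return result
-- ===== Notes on version B (the rewrite author's own statement) =====
-- stated objective: simpler
-- what changed: B replaces A's five independent floor-division/mod expressions and the intermediate [string, count] table with a single divmod chain that threads one running remainder through an ordered (unit, name) table, appending pluralized entries as it goes.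
import Mathlib
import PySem

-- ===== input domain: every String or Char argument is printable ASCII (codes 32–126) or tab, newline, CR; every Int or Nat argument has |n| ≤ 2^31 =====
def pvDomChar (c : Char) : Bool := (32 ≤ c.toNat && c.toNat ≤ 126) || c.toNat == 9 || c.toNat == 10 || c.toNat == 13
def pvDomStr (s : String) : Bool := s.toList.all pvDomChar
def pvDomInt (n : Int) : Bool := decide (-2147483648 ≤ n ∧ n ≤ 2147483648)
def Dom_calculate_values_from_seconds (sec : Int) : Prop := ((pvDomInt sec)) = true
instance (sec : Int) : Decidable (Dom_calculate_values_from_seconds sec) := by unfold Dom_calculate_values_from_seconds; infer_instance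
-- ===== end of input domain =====

-- B threads a single remainder through a (unit, name) table with divmod instead of five
-- independent floor-div/mod expressions; objective: simpler (no speed claim).

-- ===== PORT A =====
-- A's inner helper str_format
def pvStrFormat (value : Int) (name : String) : String :=
  if value = 1 then PySem.Int.toStr value ++ " " ++ name
  else PySem.Int.toStr value ++ " " ++ name ++ "s"

def calculate_values_from_seconds (sec : Int) : List String :=
  let years := PySem.Int.floordiv sec 31536000
  let days := PySem.Int.mod (PySem.Int.floordiv sec 86400) 365
  let hours := PySem.Int.mod (PySem.Int.floordiv sec 3600) 24
  let minutes := PySem.Int.mod (PySem.Int.floordiv sec 60) 60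
  let seconds := PySem.Int.mod sec 60
  let values : List (String × Int) :=
    [(pvStrFormat years "year", years),
     (pvStrFormat days "day", days),
     (pvStrFormat hours "hour", hours),
     (pvStrFormat minutes "minute", minutes),
     (pvStrFormat seconds "second", seconds)]
  (values.filter (fun i => i.2 > 0)).map (fun i => i.1)

-- ===== PORT B =====
def calculate_values_from_seconds_alt (sec : Int) : List String :=
  let table : List (Int × String) :=
    [(31536000, "year"), (86400, "day"), (3600, "hour"), (60, "minute"), (1, "second")]
  (table.foldl
    (fun (st : Int × List String) (p : Int × String) =>
      let count := PySem.Int.floordiv st.1 p.1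
      let remaining := PySem.Int.mod st.1 p.1
      (remaining,
        if count > 0 then
          st.2 ++ [if count = 1 then PySem.Int.toStr count ++ " " ++ p.2
                   else PySem.Int.toStr count ++ " " ++ p.2 ++ "s"]
        else st.2))
    (sec, [])).2

-- ===== PRECONDITION & SPEC =====
def Spec_calculate_values_from_seconds (sec : Int) (out : List String) : Prop := out = calculate_values_from_seconds_alt sec
instance (sec : Int) (out : List String) : Decidable (Spec_calculate_values_from_seconds sec out) := by unfold Spec_calculate_values_from_seconds; infer_instance

-- ===== CLAIM (what is proved, stated in full; the proofs are below) =====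
def Claim_equal_calculate_values_from_seconds : Prop := ∀ (sec : Int), Dom_calculate_values_from_seconds sec → Spec_calculate_values_from_seconds sec (calculate_values_from_seconds sec)

-- ===== LEMMAS AND PROOFS =====

theorem fd_pos (a b : Int) (h : 0 < b) : PySem.Int.floordiv a b = a / b :=
  PySem.Int.floordiv_eq_ediv_of_pos h

theorem md_pos (a b : Int) (h : 0 < b) : PySem.Int.mod a b = a % b :=
  PySem.Int.mod_eq_emod_of_pos h

theorem days_eq (a : Int) : (a % 31536000) / 86400 = (a / 86400) % 365 := by omega

theorem hours_eq (a : Int) : (a % 31536000 % 86400) / 3600 = (a / 3600) % 24 := by omega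

theorem minutes_eq (a : Int) : (a % 31536000 % 86400 % 3600) / 60 = (a / 60) % 60 := by omega

theorem seconds_eq (a : Int) : (a % 31536000 % 86400 % 3600 % 60) / 1 = a % 60 := by omega

-- ===== VERDICT (by name: the statement is the Claim_ definition above) =====
set_option maxHeartbeats 1600000 in
theorem calculate_values_from_seconds_spec : Claim_equal_calculate_values_from_seconds := by
  intro sec _
  unfold Spec_calculate_values_from_seconds
  unfold calculate_values_from_seconds calculate_values_from_seconds_alt pvStrFormat
  simp only [List.foldl, List.filter_cons, List.filter_nil,
    decide_eq_true_eq,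
    fd_pos _ _ (by norm_num : (0:Int) < 31536000),
    fd_pos _ _ (by norm_num : (0:Int) < 86400),
    fd_pos _ _ (by norm_num : (0:Int) < 3600),
    fd_pos _ _ (by norm_num : (0:Int) < 60),
    fd_pos _ _ (by norm_num : (0:Int) < 1),
    md_pos _ _ (by norm_num : (0:Int) < 31536000),
    md_pos _ _ (by norm_num : (0:Int) < 365),
    md_pos _ _ (by norm_num : (0:Int) < 24),
    md_pos _ _ (by norm_num : (0:Int) < 86400),
    md_pos _ _ (by norm_num : (0:Int) < 3600),
    md_pos _ _ (by norm_num : (0:Int) < 60),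
    md_pos _ _ (by norm_num : (0:Int) < 1),
    days_eq, hours_eq, minutes_eq, seconds_eq]
  split_ifs <;> simp
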